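-- pv_equiv track=rewrite | github.com/mollinaca/competive_programing | yukicoder/problems/2/790.py | check
-- ===== SOURCE A (Python) =====
-- def check (l:list):
--     c0 = 0
--     c1 = 0
--     for x in l:
--         if x == 0:
--             c0 += 1
--         else: # x == 1:
--             c1 += 1
--             if c1 < c0:
--                 pass
--             elif c1 == c0:
--                 c0 = 0
--                 c1 = 0
--                 continue
--             else: # c0 < c1:
--                 return False
--     else:
--         return True
-- ===== SOURCE B (Python) =====
-- def check(l: list):
--     # Scan back-to-front, maintaining the minimum prefix-balance (zeros minus
--     # non-zeros) over all prefixes of the suffix processed so far; the whole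
--     # list is valid iff that minimum is >= 0.  No early exit, no counters.
--     m = 0
--     for x in reversed(l):
--         d = 1 if x == 0 else -1
--         m = min(0, d + m)
--     return m >= 0
-- ===== Notes on version B (the rewrite author's own statement) =====
-- stated objective: alternative
-- what changed: Replaces A's forward scan with two counters, reset-at-equality and early False by a back-to-front min-fold that computes the minimum prefix balance of the whole list and compares it to zero once at the end.
import Mathlib
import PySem

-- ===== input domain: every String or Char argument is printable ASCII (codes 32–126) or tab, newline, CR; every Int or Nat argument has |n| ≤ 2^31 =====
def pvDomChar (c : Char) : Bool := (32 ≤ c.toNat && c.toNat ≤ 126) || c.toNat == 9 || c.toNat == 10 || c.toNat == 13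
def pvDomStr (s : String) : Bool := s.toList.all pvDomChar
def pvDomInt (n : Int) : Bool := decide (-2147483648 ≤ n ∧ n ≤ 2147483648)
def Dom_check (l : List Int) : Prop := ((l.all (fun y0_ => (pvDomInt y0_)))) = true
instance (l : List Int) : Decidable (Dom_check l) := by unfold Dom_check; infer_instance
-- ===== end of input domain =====

-- B replaces A's forward two-counter scan (reset at equality, early False) by a
-- back-to-front min-fold computing the minimum prefix balance, compared to 0 once
-- at the end; objective: alternative (same cost, different decomposition).

-- ===== PORT A =====
-- A's loop, step for step: state (c0, c1); reset both at c1 == c0, early False at c0 < c1.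
def checkGo (l : List Int) (c0 c1 : Int) : Bool :=
  match l with
  | [] => true
  | x :: rest =>
    if x = 0 then
      checkGo rest (c0 + 1) c1
    else
      let c1' := c1 + 1
      if c1' < c0 then checkGo rest c0 c1'
      else if c1' = c0 then checkGo rest 0 0
      else false

def check (l : List Int) : Bool := checkGo l 0 0

-- ===== PORT B =====
-- Source B's loop over reversed(l) with accumulator m, as a fold over l.reverse.
def checkAltStep (m : Int) (x : Int) : Int :=
  min 0 ((if x = 0 then 1 else -1) + m)

def check_alt (l : List Int) : Bool :=
  decide (0 ≤ l.reverse.foldl checkAltStep 0)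

-- ===== PRECONDITION & SPEC =====
def Spec_check (l : List Int) (out : Bool) : Prop := out = check_alt l
instance (l : List Int) (out : Bool) : Decidable (Spec_check l out) := by unfold Spec_check; infer_instance

-- ===== CLAIM (what is proved, stated in full; the proofs are below) =====
def Claim_equal_check : Prop := ∀ (l : List Int), Dom_check l → Spec_check l (check l)

-- ===== LEMMAS AND PROOFS =====
-- The reversed foldl is the structural right fold M l (minimum prefix balance).
def M (l : List Int) : Int :=
  match l with
  | [] => 0
  | x :: rest => min 0 ((if x = 0 then 1 else -1) + M rest)

theorem foldr_eq_M (l : List Int) :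
    List.foldr (fun x m => checkAltStep m x) 0 l = M l := by
  induction l with
  | nil => rfl
  | cons x rest ih => rw [List.foldr_cons, ih]; rfl

theorem foldl_reverse_eq_M (l : List Int) : l.reverse.foldl checkAltStep 0 = M l := by
  rw [List.foldl_reverse]; exact foldr_eq_M l

theorem M_nonpos (l : List Int) : M l ≤ 0 := by
  cases l with
  | nil => simp [M]
  | cons x rest => simp [M]

-- Invariant: A's run from state (c0, c1) with c1 ≤ c0 succeeds iff the balance
-- c0 - c1 plus the minimum prefix balance of the remaining list is nonnegative.
theorem checkGo_eq (l : List Int) : ∀ (c0 c1 : Int), c1 ≤ c0 →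
    (checkGo l c0 c1 = true ↔ 0 ≤ (c0 - c1) + M l) := by
  induction l with
  | nil =>
    intro c0 c1 h
    simp only [checkGo, M, true_iff]
    omega
  | cons x rest ih =>
    intro c0 c1 h
    simp only [checkGo, M]
    have hM := M_nonpos rest
    by_cases hx : x = 0
    · rw [if_pos hx, if_pos hx, ih (c0 + 1) c1 (by omega)]
      rcases min_cases (0 : Int) (1 + M rest) with ⟨e, _⟩ | ⟨e, _⟩ <;> rw [e] <;> omega
    · rw [if_neg hx, if_neg hx]
      by_cases h1 : c1 + 1 < c0
      · rw [if_pos h1, ih c0 (c1 + 1) (by omega)]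
        rcases min_cases (0 : Int) (-1 + M rest) with ⟨e, _⟩ | ⟨e, _⟩ <;> rw [e] <;> omega
      · rw [if_neg h1]
        by_cases h2 : c1 + 1 = c0
        · rw [if_pos h2, ih 0 0 le_rfl]
          rcases min_cases (0 : Int) (-1 + M rest) with ⟨e, _⟩ | ⟨e, _⟩ <;> rw [e] <;> omega
        · rw [if_neg h2]
          rcases min_cases (0 : Int) (-1 + M rest) with ⟨e, _⟩ | ⟨e, _⟩ <;> rw [e] <;>
            simp <;> omega

-- ===== VERDICT (by name: the statement is the Claim_ definition above) =====
theorem check_spec : Claim_equal_check := by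
  intro l _
  unfold Spec_check check check_alt
  rw [foldl_reverse_eq_M]
  apply Bool.eq_iff_iff.mpr
  simp only [decide_eq_true_eq]
  simpa using checkGo_eq l 0 0 le_rfl
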